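-- pv_equiv track=rewrite | github.com/BoraIlkinonu/Chatbot-KB-Maintenance-Mechanism | build_kb.py | parse_native_doc_sections
-- ===== SOURCE A (Python) =====
-- def parse_native_doc_sections(native_doc):
--     """Parse a native Google Doc into heading-based sections.
--     Returns dict mapping heading text -> list of content strings."""
--     sections = {}
--     current_heading = None
--     current_content = []
--
--     for block in native_doc.get("content_blocks", []):
--         style = block.get("style", "")
--         text = block.get("text", "").strip()
--
--         if not text:
--             continue
--
--         if style in ("HEADING_1", "HEADING_2", "HEADING_3"):
--             if current_heading is not None:
--                 sections[current_heading] = current_content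
--             current_heading = text
--             current_content = []
--         elif current_heading is not None:
--             current_content.append(text)
--         else:
--             # Content before any heading
--             sections.setdefault("_preamble", []).append(text)
--
--     if current_heading is not None:
--         sections[current_heading] = current_content
--
--     return sections
-- ===== SOURCE B (Python) =====
-- _HEADINGS = ("HEADING_1", "HEADING_2", "HEADING_3")
--
--
-- def _is_head(b):
--     return b[0] in _HEADINGS
--
--
-- def _span_nonhead(blocks):
--     """Split blocks into (longest non-heading prefix, remainder)."""
--     for k, b in enumerate(blocks):
--         if _is_head(b):
--             return blocks[:k], blocks[k:]
--     return blocks, []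
--
--
-- def _sections_from(blocks):
--     """blocks begins with a heading block (or is empty); (heading, body texts) pairs."""
--     out = []
--     while blocks:
--         head = blocks[0]
--         body, blocks = _span_nonhead(blocks[1:])
--         out.append((head[1], [t for _, t in body]))
--     return out
--
--
-- def parse_native_doc_sections(native_doc):
--     blocks = [(b.get("style", ""), b.get("text", "").strip())
--               for b in native_doc.get("content_blocks", [])]
--     blocks = [(s, t) for (s, t) in blocks if t]
--     pre, rest = _span_nonhead(blocks)
--     sections = {} if not pre else {"_preamble": [t for _, t in pre]}
--     for head, body in _sections_from(rest):
--         sections[head] = body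
--     return sections
-- ===== Notes on version B (the rewrite author's own statement) =====
-- stated objective: alternative
-- what changed: Replaces A's stateful current-heading/current-content accumulator loop with a filter-then-split decomposition: clean the blocks once, split off the preamble with a span, then slice out each (heading, body) segment and assign them into the dict in order.
import Mathlib
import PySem

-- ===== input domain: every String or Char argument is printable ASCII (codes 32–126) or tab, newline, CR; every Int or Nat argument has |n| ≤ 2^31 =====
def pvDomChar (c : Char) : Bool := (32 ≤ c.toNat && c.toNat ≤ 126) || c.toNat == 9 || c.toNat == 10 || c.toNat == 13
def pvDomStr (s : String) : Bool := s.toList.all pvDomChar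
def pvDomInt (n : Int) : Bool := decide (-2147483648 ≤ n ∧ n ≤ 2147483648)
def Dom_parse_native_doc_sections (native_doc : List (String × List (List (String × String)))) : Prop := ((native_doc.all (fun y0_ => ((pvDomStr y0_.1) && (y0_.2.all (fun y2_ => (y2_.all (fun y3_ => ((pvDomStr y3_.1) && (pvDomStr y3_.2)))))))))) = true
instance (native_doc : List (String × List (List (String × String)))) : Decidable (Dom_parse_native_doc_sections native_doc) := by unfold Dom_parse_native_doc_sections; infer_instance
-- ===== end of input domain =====

-- B replaces A's stateful current-heading/current-content accumulator loop by a
-- filter-then-split decomposition (clean once, span off the preamble, slice each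
-- heading's body segment); same O(n) cost, objective: alternative.

-- ===== PORT A =====
-- A's loop body: strip/skip, then the three branches on style / current_heading.
def pvStepA (st : PySem.Dict String (List String) × Option String × List String)
    (block : List (String × String)) :
    PySem.Dict String (List String) × Option String × List String :=
  let style := (PySem.Dict.mk block).getD "style" ""
  let text := PySem.Str.strip ((PySem.Dict.mk block).getD "text" "")
  if text == "" then st
  else
    let sections := st.1
    let current_heading := st.2.1
    let current_content := st.2.2
    if style == "HEADING_1" || style == "HEADING_2" || style == "HEADING_3" then
      ((match current_heading with
        | some h => sections.insert h current_content
        | none => sections), some text, [])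
    else
      match current_heading with
      | some _ => (sections, current_heading, current_content ++ [text])
      | none => (sections.modify "_preamble" [] (· ++ [text]), none, [])

def parse_native_doc_sections (native_doc : List (String × List (List (String × String)))) : List (String × List String) :=
  let st := ((PySem.Dict.mk native_doc).getD "content_blocks" []).foldl pvStepA
      (PySem.Dict.empty, none, [])
  (match st.2.1 with
   | some h => st.1.insert h st.2.2
   | none => st.1).items

-- ===== PORT B =====
def pvIsHead (b : String × String) : Bool :=
  b.1 == "HEADING_1" || b.1 == "HEADING_2" || b.1 == "HEADING_3"

-- Source B's _sections_from: peel one heading, span off its body, recurse.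
def pvSectionsFrom : List (String × String) → List (String × List String)
  | [] => []
  | b :: rest =>
    (b.2, (rest.takeWhile (fun x => !pvIsHead x)).map Prod.snd)
      :: pvSectionsFrom (rest.dropWhile (fun x => !pvIsHead x))
  termination_by l => l.length
  decreasing_by
    simp only [List.length_cons]
    exact Nat.lt_succ_of_le (List.length_dropWhile_le _ rest)

def parse_native_doc_sections_alt (native_doc : List (String × List (List (String × String)))) : List (String × List String) :=
  let blocks0 := ((PySem.Dict.mk native_doc).getD "content_blocks" []).map
      (fun b => ((PySem.Dict.mk b).getD "style" "",
                 PySem.Str.strip ((PySem.Dict.mk b).getD "text" "")))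
  let blocks := blocks0.filter (fun st => st.2 != "")
  let pre := blocks.takeWhile (fun x => !pvIsHead x)
  let rest := blocks.dropWhile (fun x => !pvIsHead x)
  let sections : PySem.Dict String (List String) :=
    if pre.isEmpty then PySem.Dict.empty
    else PySem.Dict.empty.insert "_preamble" (pre.map Prod.snd)
  ((pvSectionsFrom rest).foldl (fun d hb => d.insert hb.1 hb.2) sections).items

-- ===== PRECONDITION & SPEC =====
def Spec_parse_native_doc_sections (native_doc : List (String × List (List (String × String)))) (out : List (String × List String)) : Prop := out = parse_native_doc_sections_alt native_doc
instance (native_doc : List (String × List (List (String × String)))) (out : List (String × List String)) : Decidable (Spec_parse_native_doc_sections native_doc out) := by unfold Spec_parse_native_doc_sections; infer_instance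

-- ===== CLAIM (what is proved, stated in full; the proofs are below) =====
def Claim_equal_parse_native_doc_sections : Prop := ∀ (native_doc : List (String × List (List (String × String)))), Dom_parse_native_doc_sections native_doc → Spec_parse_native_doc_sections native_doc (parse_native_doc_sections native_doc)

-- ===== LEMMAS AND PROOFS =====

-- A's loop body on an already-cleaned (style, stripped-nonempty-text) pair.
def pvCoreA (st : PySem.Dict String (List String) × Option String × List String)
    (b : String × String) :
    PySem.Dict String (List String) × Option String × List String :=
  if pvIsHead b then
    ((match st.2.1 with
      | some h => st.1.insert h st.2.2
      | none => st.1), some b.2, [])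
  else
    match st.2.1 with
    | some _ => (st.1, st.2.1, st.2.2 ++ [b.2])
    | none => (st.1.modify "_preamble" [] (· ++ [b.2]), none, [])

def pvClean (b : List (String × String)) : String × String :=
  ((PySem.Dict.mk b).getD "style" "", PySem.Str.strip ((PySem.Dict.mk b).getD "text" ""))

def pvFinish (st : PySem.Dict String (List String) × Option String × List String) :
    PySem.Dict String (List String) :=
  match st.2.1 with
  | some h => st.1.insert h st.2.2
  | none => st.1

theorem pvStepA_eq (st : PySem.Dict String (List String) × Option String × List String)
    (b : List (String × String)) :
    pvStepA st b = if (pvClean b).2 == "" then st else pvCoreA st (pvClean b) := by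
  simp only [pvStepA, pvCoreA, pvClean, pvIsHead]

theorem pvFoldA_eq (raw : List (List (String × String)))
    (st : PySem.Dict String (List String) × Option String × List String) :
    raw.foldl pvStepA st
      = ((raw.map pvClean).filter (fun p => p.2 != "")).foldl pvCoreA st := by
  induction raw generalizing st with
  | nil => rfl
  | cons b raw ih =>
    simp only [List.foldl_cons, List.map_cons, List.filter_cons, pvStepA_eq]
    by_cases h : (pvClean b).2 = ""
    · simp [h, ih]
    · simp [h, ih]

-- heading phase: from state (d, some h, c) the rest of A's loop produces exactly
-- B's per-section inserts.
theorem pvLemH (bs : List (String × String)) (d : PySem.Dict String (List String))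
    (h : String) (c : List String) :
    pvFinish (bs.foldl pvCoreA (d, some h, c))
      = (pvSectionsFrom (bs.dropWhile (fun x => !pvIsHead x))).foldl
          (fun d hb => d.insert hb.1 hb.2)
          (d.insert h (c ++ (bs.takeWhile (fun x => !pvIsHead x)).map Prod.snd)) := by
  induction bs generalizing d h c with
  | nil => simp [pvFinish, pvSectionsFrom]
  | cons b bs ih =>
    by_cases hb : pvIsHead b
    · simp only [List.foldl_cons, pvCoreA, hb, if_pos, List.dropWhile_cons, List.takeWhile_cons, Bool.not_true]
      rw [ih]
      simp [pvSectionsFrom]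
    · simp only [List.foldl_cons, pvCoreA, hb, if_neg, Bool.false_eq_true,
        not_false_eq_true, List.dropWhile_cons, List.takeWhile_cons]
      rw [ih]
      simp [List.append_assoc]

-- preamble phase: from state (d, none, []) A's loop setdefault-appends the
-- leading non-heading texts, then behaves as the heading phase.
theorem pvLemP (bs : List (String × String)) (d : PySem.Dict String (List String)) :
    pvFinish (bs.foldl pvCoreA (d, none, []))
      = (pvSectionsFrom (bs.dropWhile (fun x => !pvIsHead x))).foldl
          (fun d hb => d.insert hb.1 hb.2)
          (((bs.takeWhile (fun x => !pvIsHead x)).map Prod.snd).foldl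
            (fun d t => d.modify "_preamble" [] (· ++ [t])) d) := by
  induction bs generalizing d with
  | nil => simp [pvFinish, pvSectionsFrom]
  | cons b bs ih =>
    by_cases hb : pvIsHead b
    · simp only [List.foldl_cons, pvCoreA, hb, if_pos, List.dropWhile_cons, List.takeWhile_cons, Bool.not_true]
      rw [pvLemH]
      simp [pvSectionsFrom]
    · simp only [List.foldl_cons, pvCoreA, hb, if_neg, Bool.false_eq_true,
        not_false_eq_true, List.dropWhile_cons, List.takeWhile_cons]
      rw [ih]
      simp

theorem pvPreamble (ts : List String) :
    ts.foldl (fun d t => d.modify "_preamble" [] (· ++ [t]))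
        (PySem.Dict.empty : PySem.Dict String (List String))
      = if ts.isEmpty then PySem.Dict.empty
        else PySem.Dict.empty.insert "_preamble" ts := by
  cases ts with
  | nil => rfl
  | cons t ts =>
    have key : ∀ (us : List String) (l : List String),
        us.foldl (fun d t => d.modify "_preamble" [] (· ++ [t]))
            (PySem.Dict.mk [("_preamble", l)])
          = PySem.Dict.mk [("_preamble", l ++ us)] := by
      intro us
      induction us with
      | nil => simp
      | cons u us ih =>
        intro l
        simp only [List.foldl_cons]
        have : (PySem.Dict.mk [("_preamble", l)]).modify "_preamble" [] (· ++ [u])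
            = PySem.Dict.mk [("_preamble", l ++ [u])] := by
          simp [PySem.Dict.modify, PySem.Dict.getD, PySem.Dict.get?,
            PySem.Dict.contains, PySem.Dict.insert]
        rw [this, ih]
        simp
    simp only [List.foldl_cons, List.isEmpty_cons]
    have h0 : (PySem.Dict.empty : PySem.Dict String (List String)).modify
        "_preamble" [] (· ++ [t]) = PySem.Dict.mk [("_preamble", [t])] := by
      simp [PySem.Dict.modify, PySem.Dict.getD, PySem.Dict.get?,
        PySem.Dict.contains, PySem.Dict.empty, PySem.Dict.insert]
    rw [h0, key]
    simp [PySem.Dict.insert, PySem.Dict.empty, PySem.Dict.contains]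

-- ===== VERDICT (by name: the statement is the Claim_ definition above) =====
theorem parse_native_doc_sections_spec : Claim_equal_parse_native_doc_sections := by
  intro native_doc _
  unfold Spec_parse_native_doc_sections
  unfold parse_native_doc_sections parse_native_doc_sections_alt
  rw [show (fun (b : List (String × String)) =>
        ((PySem.Dict.mk b).getD "style" "",
         PySem.Str.strip ((PySem.Dict.mk b).getD "text" ""))) = pvClean from rfl]
  rw [pvFoldA_eq]
  show (pvFinish _).items = _
  rw [pvLemP, pvPreamble]
  rw [List.isEmpty_map]
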